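-- pv_equiv track=rewrite | github.com/aliendevuz/words-upload | old/stats_of_e_w.py | count_field_stats
-- ===== SOURCE A (Python) =====
-- FIELDS = ["w", "t", "tp", "d", "s"]
--
-- def is_empty(value):
--     if value is None:
--         return True
--     val = str(value).strip().lower()
--     return val == "null" or val == "" or val.startswith("null_of_")
--
-- def count_field_stats(data):
--     stats = {field: {"filled": 0, "empty": 0} for field in FIELDS}
--     for entry in data:
--         for field in FIELDS:
--             value = entry.get(field)
--             if is_empty(value):
--                 stats[field]["empty"] += 1
--             else:
--                 stats[field]["filled"] += 1
--     return stats
-- ===== SOURCE B (Python) =====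
-- FIELDS = ["w", "t", "tp", "d", "s"]
--
-- def is_empty(value):
--     if value is None:
--         return True
--     val = str(value).strip().lower()
--     return val == "null" or val == "" or val.startswith("null_of_")
--
-- def count_field_stats(data):
--     entries = list(data)
--     n = len(entries)
--     stats = {}
--     for field in FIELDS:
--         empty = sum(1 for e in entries if is_empty(e.get(field)))
--         stats[field] = {"filled": n - empty, "empty": empty}
--     return stats
-- ===== Notes on version B (the rewrite author's own statement) =====
-- stated objective: simpler
-- what changed: Field-major instead of entry-major: for each field B counts the empty entries with one sum over the data and derives filled as n - empty, so the pre-initialised mutable nested counter dict of A disappears.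
import Mathlib
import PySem

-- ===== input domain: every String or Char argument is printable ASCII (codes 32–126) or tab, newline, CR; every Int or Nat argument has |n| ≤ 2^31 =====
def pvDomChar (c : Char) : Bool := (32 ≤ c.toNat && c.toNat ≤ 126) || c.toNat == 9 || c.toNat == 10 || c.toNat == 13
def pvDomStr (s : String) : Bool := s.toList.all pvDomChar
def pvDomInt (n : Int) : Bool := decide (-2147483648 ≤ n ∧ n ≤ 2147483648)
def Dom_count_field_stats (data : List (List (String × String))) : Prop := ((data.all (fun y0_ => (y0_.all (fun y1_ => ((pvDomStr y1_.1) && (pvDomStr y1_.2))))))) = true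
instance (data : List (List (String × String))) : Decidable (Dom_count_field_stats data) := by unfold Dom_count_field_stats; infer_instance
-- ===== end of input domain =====

-- B counts field-major: one sum of empties per field plus filled = n - empty, replacing A's
-- entry-major double loop over a pre-initialised mutable nested counter dict (objective: simpler).

-- ===== PORT A =====
def FIELDS : List String := ["w", "t", "tp", "d", "s"]

def is_empty (value : Option String) : Bool :=
  match value with
  | none => true
  | some v =>
    let val := PySem.Str.lower (PySem.Str.strip v)
    val == "null" || val == "" || PySem.Str.startswith val "null_of_"

def count_field_stats (data : List (List (String × String))) : List (String × List (String × Int)) :=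
  let stats : PySem.Dict String (PySem.Dict String Int) :=
    FIELDS.foldl (fun st field =>
      st.insert field ((PySem.Dict.empty.insert "filled" (0 : Int)).insert "empty" 0)) PySem.Dict.empty
  let stats := data.foldl (fun st entry =>
    FIELDS.foldl (fun st field =>
      let value := (PySem.Dict.ofList entry).get? field
      if is_empty value then
        st.modify field PySem.Dict.empty (fun inner => inner.modify "empty" 0 (· + 1))
      else
        st.modify field PySem.Dict.empty (fun inner => inner.modify "filled" 0 (· + 1))) st) stats
  stats.items.map (fun p => (p.1, p.2.items))

-- ===== PORT B =====
def is_empty_alt (value : Option String) : Bool :=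
  match value with
  | none => true
  | some v =>
    let val := PySem.Str.lower (PySem.Str.strip v)
    val == "null" || val == "" || PySem.Str.startswith val "null_of_"

def count_field_stats_alt (data : List (List (String × String))) : List (String × List (String × Int)) :=
  let n : Int := data.length
  let stats : PySem.Dict String (PySem.Dict String Int) :=
    FIELDS.foldl (fun st field =>
      let empty : Int := data.foldl (fun acc e =>
        if is_empty_alt ((PySem.Dict.ofList e).get? field) then acc + 1 else acc) 0
      st.insert field ((PySem.Dict.empty.insert "filled" (n - empty)).insert "empty" empty)) PySem.Dict.empty
  stats.items.map (fun p => (p.1, p.2.items))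

-- ===== PRECONDITION & SPEC =====
def Spec_count_field_stats (data : List (List (String × String))) (out : List (String × List (String × Int))) : Prop := out = count_field_stats_alt data
instance (data : List (List (String × String))) (out : List (String × List (String × Int))) : Decidable (Spec_count_field_stats data out) := by unfold Spec_count_field_stats; infer_instance

-- ===== CLAIM (what is proved, stated in full; the proofs are below) =====
def Claim_equal_count_field_stats : Prop := ∀ (data : List (List (String × String))), Dom_count_field_stats data → Spec_count_field_stats data (count_field_stats data)

-- ===== LEMMAS AND PROOFS =====

-- 1 if the entry is empty at this field, else 0
def cnt (field : String) (e : List (String × String)) : Int :=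
  if is_empty ((PySem.Dict.ofList e).get? field) then 1 else 0

-- total number of empty entries at this field
def esum (field : String) (data : List (List (String × String))) : Int :=
  (data.map (cnt field)).sum

-- the stats dict of A, as an explicit literal parametrised by the ten counters
def mkS (fw ew ft et ftp etp fd ed fs es : Int) : PySem.Dict String (PySem.Dict String Int) :=
  PySem.Dict.mk [("w", PySem.Dict.mk [("filled", fw), ("empty", ew)]),
                 ("t", PySem.Dict.mk [("filled", ft), ("empty", et)]),
                 ("tp", PySem.Dict.mk [("filled", ftp), ("empty", etp)]),
                 ("d", PySem.Dict.mk [("filled", fd), ("empty", ed)]),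
                 ("s", PySem.Dict.mk [("filled", fs), ("empty", es)])]

set_option maxHeartbeats 2000000 in
theorem stepA (fw ew ft et ftp etp fd ed fs es : Int) (entry : List (String × String)) :
    (FIELDS.foldl (fun st field =>
      let value := (PySem.Dict.ofList entry).get? field
      if is_empty value then
        st.modify field PySem.Dict.empty (fun inner => inner.modify "empty" 0 (· + 1))
      else
        st.modify field PySem.Dict.empty (fun inner => inner.modify "filled" 0 (· + 1)))
      (mkS fw ew ft et ftp etp fd ed fs es))
    = mkS (if is_empty ((PySem.Dict.ofList entry).get? "w") then fw else fw + 1)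
          (if is_empty ((PySem.Dict.ofList entry).get? "w") then ew + 1 else ew)
          (if is_empty ((PySem.Dict.ofList entry).get? "t") then ft else ft + 1)
          (if is_empty ((PySem.Dict.ofList entry).get? "t") then et + 1 else et)
          (if is_empty ((PySem.Dict.ofList entry).get? "tp") then ftp else ftp + 1)
          (if is_empty ((PySem.Dict.ofList entry).get? "tp") then etp + 1 else etp)
          (if is_empty ((PySem.Dict.ofList entry).get? "d") then fd else fd + 1)
          (if is_empty ((PySem.Dict.ofList entry).get? "d") then ed + 1 else ed)
          (if is_empty ((PySem.Dict.ofList entry).get? "s") then fs else fs + 1)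
          (if is_empty ((PySem.Dict.ofList entry).get? "s") then es + 1 else es) := by
  simp only [FIELDS, List.foldl]
  by_cases h1 : is_empty ((PySem.Dict.ofList entry).get? "w") <;>
  by_cases h2 : is_empty ((PySem.Dict.ofList entry).get? "t") <;>
  by_cases h3 : is_empty ((PySem.Dict.ofList entry).get? "tp") <;>
  by_cases h4 : is_empty ((PySem.Dict.ofList entry).get? "d") <;>
  by_cases h5 : is_empty ((PySem.Dict.ofList entry).get? "s") <;>
    simp only [h1, h2, h3, h4, h5, if_true, if_false] <;> rfl

set_option maxHeartbeats 2000000 in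
theorem loopA (data : List (List (String × String)))
    (fw ew ft et ftp etp fd ed fs es : Int) :
    (data.foldl (fun st entry =>
      FIELDS.foldl (fun st field =>
        let value := (PySem.Dict.ofList entry).get? field
        if is_empty value then
          st.modify field PySem.Dict.empty (fun inner => inner.modify "empty" 0 (· + 1))
        else
          st.modify field PySem.Dict.empty (fun inner => inner.modify "filled" 0 (· + 1))) st)
      (mkS fw ew ft et ftp etp fd ed fs es))
    = mkS (fw + ((data.length : Int) - esum "w" data)) (ew + esum "w" data)
          (ft + ((data.length : Int) - esum "t" data)) (et + esum "t" data)
          (ftp + ((data.length : Int) - esum "tp" data)) (etp + esum "tp" data)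
          (fd + ((data.length : Int) - esum "d" data)) (ed + esum "d" data)
          (fs + ((data.length : Int) - esum "s" data)) (es + esum "s" data) := by
  induction data generalizing fw ew ft et ftp etp fd ed fs es with
  | nil => simp [esum]
  | cons e tl ih =>
    rw [List.foldl_cons, stepA, ih]
    simp only [esum, cnt, List.map_cons, List.sum_cons, List.length_cons]
    by_cases h1 : is_empty ((PySem.Dict.ofList e).get? "w") <;>
    by_cases h2 : is_empty ((PySem.Dict.ofList e).get? "t") <;>
    by_cases h3 : is_empty ((PySem.Dict.ofList e).get? "tp") <;>
    by_cases h4 : is_empty ((PySem.Dict.ofList e).get? "d") <;>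
    by_cases h5 : is_empty ((PySem.Dict.ofList e).get? "s") <;>
      simp only [h1, h2, h3, h4, h5, if_true, if_false, mkS, PySem.Dict.mk.injEq,
        List.cons.injEq, Prod.mk.injEq, and_true, true_and, List.nil_eq, and_self] <;>
      and_intros <;> push_cast <;> ring

theorem alt_eq : is_empty_alt = is_empty := rfl

theorem foldcnt (field : String) (data : List (List (String × String))) (a : Int) :
    data.foldl (fun acc e =>
      if is_empty_alt ((PySem.Dict.ofList e).get? field) then acc + 1 else acc) a
    = a + esum field data := by
  induction data generalizing a with
  | nil => simp [esum]
  | cons e tl ih =>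
    rw [List.foldl_cons, ih]
    simp only [alt_eq, esum, List.map_cons, List.sum_cons, cnt]
    by_cases h : is_empty ((PySem.Dict.ofList e).get? field) <;>
      simp [h] <;> ring

theorem altB (data : List (List (String × String))) :
    count_field_stats_alt data
    = (mkS ((data.length : Int) - esum "w" data) (esum "w" data)
           ((data.length : Int) - esum "t" data) (esum "t" data)
           ((data.length : Int) - esum "tp" data) (esum "tp" data)
           ((data.length : Int) - esum "d" data) (esum "d" data)
           ((data.length : Int) - esum "s" data) (esum "s" data)).items.map
        (fun p => (p.1, p.2.items)) := by
  simp only [count_field_stats_alt, FIELDS, List.foldl, foldcnt, zero_add]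
  rfl

-- ===== VERDICT (by name: the statement is the Claim_ definition above) =====
theorem count_field_stats_spec : Claim_equal_count_field_stats := by
  intro data _
  show count_field_stats data = count_field_stats_alt data
  have hinit : (FIELDS.foldl (fun st field =>
      st.insert field ((PySem.Dict.empty.insert "filled" (0 : Int)).insert "empty" 0)) PySem.Dict.empty)
      = mkS 0 0 0 0 0 0 0 0 0 0 := rfl
  simp only [count_field_stats, hinit, loopA, altB, zero_add]
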